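-- pv_equiv track=rewrite | github.com/PietPjotr/advent-of-code | 2023/day_11/11.py | get_all_distances
-- ===== SOURCE A (Python) =====
-- def get_all_distances(galaxies, empty_rows, empty_cols, size):
--     distances = []
--     for galaxy in galaxies:
--         d = []
--         for other in galaxies:
--             rows = 0
--             for empty_row in empty_rows:
--                 if empty_row in range(min(galaxy[0], other[0]), max(galaxy[0], other[0])):
--                     rows += 1
--             cols = 0
--             for empty_col in empty_cols:
--                 if empty_col in range(min(galaxy[1], other[1]), max(galaxy[1], other[1])):
--                     cols += 1
--             d.append(abs(galaxy[0] - other[0]) + abs(galaxy[1] - other[1]) + (rows + cols) * (size - 1))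
--         distances.append(d)
--     return distances
-- ===== SOURCE B (Python) =====
-- def get_all_distances(galaxies, empty_rows, empty_cols, size):
--     # Precompute, per galaxy, how many empty rows/cols lie strictly below its
--     # coordinates; a pair's empty count is then the absolute difference of
--     # these monotone prefix counts (O(1) per pair).
--     k = size - 1
--     keys = [(r, c,
--              sum(1 for e in empty_rows if e < r),
--              sum(1 for e in empty_cols if e < c))
--             for r, c in galaxies]
--     return [[abs(r1 - r2) + abs(c1 - c2) + (abs(f1 - f2) + abs(g1 - g2)) * k
--              for (r2, c2, f2, g2) in keys]
--             for (r1, c1, f1, g1) in keys]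
-- ===== Notes on version B (the rewrite author's own statement) =====
-- stated objective: faster
-- what changed: Replaces the per-pair scan of empty_rows/empty_cols by per-galaxy prefix counts (number of empty rows/cols below each coordinate) computed once, so each pair's empty count is an absolute difference of two precomputed counts.
import Mathlib
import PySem

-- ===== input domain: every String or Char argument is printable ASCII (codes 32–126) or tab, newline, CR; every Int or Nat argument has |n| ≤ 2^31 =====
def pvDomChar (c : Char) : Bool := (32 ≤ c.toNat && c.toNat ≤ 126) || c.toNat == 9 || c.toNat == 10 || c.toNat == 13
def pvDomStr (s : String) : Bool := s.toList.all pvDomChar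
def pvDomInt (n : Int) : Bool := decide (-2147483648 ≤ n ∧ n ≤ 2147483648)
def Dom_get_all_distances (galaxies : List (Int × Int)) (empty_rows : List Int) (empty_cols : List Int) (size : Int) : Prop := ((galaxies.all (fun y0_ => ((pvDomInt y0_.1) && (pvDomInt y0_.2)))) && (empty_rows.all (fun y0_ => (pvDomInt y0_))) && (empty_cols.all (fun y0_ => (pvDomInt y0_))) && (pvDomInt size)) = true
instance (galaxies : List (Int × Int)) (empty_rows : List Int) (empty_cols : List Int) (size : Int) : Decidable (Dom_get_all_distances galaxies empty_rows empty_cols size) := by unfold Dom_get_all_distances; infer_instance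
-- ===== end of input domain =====

-- B replaces A's per-pair scan of empty_rows/empty_cols by per-galaxy prefix counts
-- computed once, making each pair O(1) (objective: faster, asymptotic).

-- ===== PORT A =====
def get_all_distances (galaxies : List (Int × Int)) (empty_rows : List Int) (empty_cols : List Int) (size : Int) : List (List Int) :=
  galaxies.foldl (fun distances galaxy =>
    distances ++ [galaxies.foldl (fun d other =>
      let rows : Int := empty_rows.foldl (fun rows e =>
        if min galaxy.1 other.1 ≤ e ∧ e < max galaxy.1 other.1 then rows + 1 else rows) 0
      let cols : Int := empty_cols.foldl (fun cols e =>
        if min galaxy.2 other.2 ≤ e ∧ e < max galaxy.2 other.2 then cols + 1 else cols) 0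
      d ++ [|galaxy.1 - other.1| + |galaxy.2 - other.2| + (rows + cols) * (size - 1)]) []]) []

-- ===== PORT B =====
def get_all_distances_alt (galaxies : List (Int × Int)) (empty_rows : List Int) (empty_cols : List Int) (size : Int) : List (List Int) :=
  let k := size - 1
  let keys : List (Int × Int × Int × Int) := galaxies.map (fun g =>
    (g.1, g.2,
     (empty_rows.countP (fun e => decide (e < g.1)) : Int),
     (empty_cols.countP (fun e => decide (e < g.2)) : Int)))
  keys.map (fun a => keys.map (fun b =>
    |a.1 - b.1| + |a.2.1 - b.2.1| + (|a.2.2.1 - b.2.2.1| + |a.2.2.2 - b.2.2.2|) * k))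

-- ===== PRECONDITION & SPEC =====
def Spec_get_all_distances (galaxies : List (Int × Int)) (empty_rows : List Int) (empty_cols : List Int) (size : Int) (out : List (List Int)) : Prop := out = get_all_distances_alt galaxies empty_rows empty_cols size
instance (galaxies : List (Int × Int)) (empty_rows : List Int) (empty_cols : List Int) (size : Int) (out : List (List Int)) : Decidable (Spec_get_all_distances galaxies empty_rows empty_cols size out) := by unfold Spec_get_all_distances; infer_instance

-- ===== CLAIM (what is proved, stated in full; the proofs are below) =====
def Claim_equal_get_all_distances : Prop := ∀ (galaxies : List (Int × Int)) (empty_rows : List Int) (empty_cols : List Int) (size : Int), Dom_get_all_distances galaxies empty_rows empty_cols size → Spec_get_all_distances galaxies empty_rows empty_cols size (get_all_distances galaxies empty_rows empty_cols size)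

-- ===== LEMMAS AND PROOFS =====

-- foldl-append over a list is map
theorem pv_foldl_append_map {α β : Type} (f : α → β) (l : List α) (acc : List β) :
    l.foldl (fun a x => a ++ [f x]) acc = acc ++ l.map f := by
  induction l generalizing acc with
  | nil => simp
  | cons x xs ih => simp [List.foldl, ih]

-- the counting foldl is countP (as an Int)
theorem pv_foldl_count {α : Type} (p : α → Prop) [DecidablePred p] (l : List α) (n : Int) :
    l.foldl (fun c e => if p e then c + 1 else c) n = n + (l.countP (fun e => decide (p e)) : Int) := by
  induction l generalizing n with
  | nil => simp
  | cons x xs ih =>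
    simp only [List.foldl_cons, List.countP_cons, ih]
    by_cases h : p x <;> simp [h] <;> omega

-- interval count = difference of monotone prefix counts
theorem pv_count_between (l : List Int) (a b : Int) (hab : a ≤ b) :
    l.countP (fun e => decide (a ≤ e ∧ e < b)) + l.countP (fun e => decide (e < a))
      = l.countP (fun e => decide (e < b)) := by
  induction l with
  | nil => simp
  | cons x xs ih =>
    simp only [List.countP_cons, decide_eq_true_eq]
    split_ifs <;> omega

theorem pv_count_mono (l : List Int) (a b : Int) (hab : a ≤ b) :
    l.countP (fun e => decide (e < a)) ≤ l.countP (fun e => decide (e < b)) := by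
  apply List.countP_mono_left
  intro x _ hx
  simp only [decide_eq_true_eq] at *
  omega

theorem pv_count_abs (l : List Int) (a b : Int) :
    (l.countP (fun e => decide (min a b ≤ e ∧ e < max a b)) : Int)
      = |(l.countP (fun e => decide (e < a)) : Int) - (l.countP (fun e => decide (e < b)) : Int)| := by
  rcases le_total a b with h | h
  · rw [min_eq_left h, max_eq_right h]
    have h1 := pv_count_between l a b h
    have h2 := pv_count_mono l a b h
    rw [abs_sub_comm, abs_of_nonneg (by omega)]
    omega
  · rw [min_eq_right h, max_eq_left h]
    have h1 := pv_count_between l b a h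
    have h2 := pv_count_mono l b a h
    rw [abs_of_nonneg (by omega)]
    omega

-- ===== VERDICT (by name: the statement is the Claim_ definition above) =====
theorem get_all_distances_spec : Claim_equal_get_all_distances := by
  intro galaxies empty_rows empty_cols size _
  unfold Spec_get_all_distances get_all_distances get_all_distances_alt
  rw [pv_foldl_append_map]
  simp only [List.nil_append, List.map_map]
  apply List.map_congr_left
  intro g _
  rw [pv_foldl_append_map]
  simp only [List.nil_append]
  apply List.map_congr_left
  intro o _
  simp only [Function.comp_apply, pv_foldl_count, pv_count_abs, Int.zero_add]
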